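-- pv_equiv track=rewrite | github.com/DISL-Lab/ReFeed | src/feedback_mapping.py | create_feedback_report
-- ===== SOURCE A (Python) =====
-- def create_feedback_report(sentences, faithfulness_labels, keyfacts, completeness_labels, conciseness_labels):
--     """
--     Create a comprehensive feedback report for summary evaluation.
--
--     Args:
--         sentences (list): List of summary sentences
--         faithfulness_labels (list): Binary labels (1=faithful, 0=unfaithful) for each sentence
--         keyfacts (list): List of key facts from the document
--         completeness_labels (list): Binary labels (1=included, 0=missing) for each keyfact
--         conciseness_labels (list): Binary labels (1=key content, 0=unnecessary) for each sentence
--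
--     Returns:
--         str: Formatted feedback report containing all three dimensions
--     """
--     # Process faithfulness feedback
--     faithfulness_feedback = []
--     for idx, (sentence, label) in enumerate(zip(sentences, faithfulness_labels)):
--         if label == 0:
--             faithfulness_feedback.append({
--                 "sentence_id": idx + 1,
--                 "sentence": sentence,
--             })
--
--     # Process completeness feedback
--     completeness_feedback = []
--     for idx, (keyfact, label) in enumerate(zip(keyfacts, completeness_labels)):
--         if label == 0:
--             completeness_feedback.append({
--                 "missing_key_content_id": idx + 1,
--                 "keyfact": keyfact,
--             })
--
--     # Process conciseness feedback
--     conciseness_feedback = []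
--     for idx, (sentence, label) in enumerate(zip(sentences, conciseness_labels)):
--         if label == 0:
--             conciseness_feedback.append({
--                 "sentence_id": idx + 1,
--                 "sentence": sentence,
--             })
--
--     # Generate reports
--     faith_report = _create_faithfulness_report(faithfulness_feedback)
--     comp_report = _create_completeness_report(completeness_feedback)
--     conc_report = _create_conciseness_report(conciseness_feedback)
--
--     # Combine all reports
--     report_text = "\n\n".join([faith_report, comp_report, conc_report])
--
--     return report_text
--
-- def _create_faithfulness_report(data):
--     """Generate faithfulness feedback report."""
--     report = "***Faithfulness Feedback***\n\n"
--     if len(data) == 0: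
--         report += "All sentences are factually consistent with the Document.\n"
--     else:
--         report += "These summary sentences are factually inconsistent with the Document: \n"
--         for entry in data:
--             report += f"- Sentence {entry['sentence_id']}: {entry['sentence']}\n"
--     return report
--
-- def _create_completeness_report(data):
--     """Generate completeness feedback report."""
--     report = "***Completeness Feedback***\n\n"
--     if len(data) == 0:
--         report += "All key contents are included in the summary.\n"
--     else:
--         report += "These key contents are missing in the summary: \n"
--         for entry in data:
--             report += f"Missing key content {entry['missing_key_content_id']}: {entry['keyfact']}\n"
--     return report
--
-- def _create_conciseness_report(data):
--     """Generate conciseness feedback report."""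
--     report = "***Conciseness Feedback***\n\n"
--     if len(data) == 0:
--         report += "All summary sentences contain key content.\n"
--     else:
--         report += "These summary sentences do not contain key content: \n"
--         for entry in data:
--             report += f"Sentence {entry['sentence_id']}: {entry['sentence']}\n"
--     return report
-- ===== SOURCE B (Python) =====
-- def create_feedback_report(sentences, faithfulness_labels, keyfacts, completeness_labels, conciseness_labels):
--     def section(header, all_msg, intro, prefix, items, labels):
--         buf = ""
--         found = False
--         for i, (item, label) in enumerate(zip(items, labels)):
--             if label == 0:
--                 buf += f"{prefix}{i + 1}: {item}\n"
--                 found = True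
--         return header + "\n\n" + ((intro + buf) if found else all_msg)
--
--     return "\n\n".join([
--         section("***Faithfulness Feedback***",
--                 "All sentences are factually consistent with the Document.\n",
--                 "These summary sentences are factually inconsistent with the Document: \n",
--                 "- Sentence ", sentences, faithfulness_labels),
--         section("***Completeness Feedback***",
--                 "All key contents are included in the summary.\n",
--                 "These key contents are missing in the summary: \n",
--                 "Missing key content ", keyfacts, completeness_labels),
--         section("***Conciseness Feedback***",
--                 "All summary sentences contain key content.\n",
--                 "These summary sentences do not contain key content: \n",
--                 "Sentence ", sentences, conciseness_labels),
--     ])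
-- ===== Notes on version B (the rewrite author's own statement) =====
-- stated objective: simpler
-- what changed: Replaces the three filtered lists-of-dicts and the three per-dimension report helpers with one generic single-pass section builder that accumulates formatted lines in a string buffer with a found-flag while scanning zip(items, labels) once.
import Mathlib
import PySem

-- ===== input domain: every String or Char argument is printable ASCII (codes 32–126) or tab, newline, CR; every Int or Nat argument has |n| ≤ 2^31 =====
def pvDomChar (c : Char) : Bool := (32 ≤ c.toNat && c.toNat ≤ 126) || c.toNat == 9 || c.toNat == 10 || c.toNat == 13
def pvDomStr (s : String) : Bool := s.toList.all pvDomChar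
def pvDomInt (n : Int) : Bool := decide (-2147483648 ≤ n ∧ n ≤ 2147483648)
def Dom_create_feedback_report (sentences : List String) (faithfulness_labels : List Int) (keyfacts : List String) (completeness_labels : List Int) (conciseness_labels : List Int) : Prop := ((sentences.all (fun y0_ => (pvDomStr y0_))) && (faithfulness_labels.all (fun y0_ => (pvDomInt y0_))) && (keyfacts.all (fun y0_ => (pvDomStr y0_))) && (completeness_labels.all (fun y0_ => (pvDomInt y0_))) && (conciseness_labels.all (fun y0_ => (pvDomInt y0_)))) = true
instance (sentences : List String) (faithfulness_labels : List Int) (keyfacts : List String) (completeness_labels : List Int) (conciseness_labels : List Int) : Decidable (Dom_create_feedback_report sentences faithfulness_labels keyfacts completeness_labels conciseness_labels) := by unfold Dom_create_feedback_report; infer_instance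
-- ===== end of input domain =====

-- B replaces A's three filtered lists-of-dicts plus three report helpers with one generic
-- single-pass section builder (string buffer + found-flag over zip); objective: simpler.

-- ===== PORT A =====
-- A's three identical 'for idx, (x, label) in enumerate(zip(...)): if label == 0: append' loops
def pvCollect (items : List String) (labels : List Int) : List (Int × String) :=
  (PySem.List.enumerate (items.zip labels)).foldl
    (fun acc p => if p.2.2 == 0 then acc ++ [(p.1 + 1, p.2.1)] else acc) []

def pvFaithReport (data : List (Int × String)) : String :=
  if data.length == 0 then
    "***Faithfulness Feedback***\n\n" ++ "All sentences are factually consistent with the Document.\n"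
  else
    data.foldl (fun r e => r ++ "- Sentence " ++ PySem.Int.toStr e.1 ++ ": " ++ e.2 ++ "\n")
      ("***Faithfulness Feedback***\n\n" ++ "These summary sentences are factually inconsistent with the Document: \n")

def pvCompReport (data : List (Int × String)) : String :=
  if data.length == 0 then
    "***Completeness Feedback***\n\n" ++ "All key contents are included in the summary.\n"
  else
    data.foldl (fun r e => r ++ "Missing key content " ++ PySem.Int.toStr e.1 ++ ": " ++ e.2 ++ "\n")
      ("***Completeness Feedback***\n\n" ++ "These key contents are missing in the summary: \n")

def pvConcReport (data : List (Int × String)) : String :=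
  if data.length == 0 then
    "***Conciseness Feedback***\n\n" ++ "All summary sentences contain key content.\n"
  else
    data.foldl (fun r e => r ++ "Sentence " ++ PySem.Int.toStr e.1 ++ ": " ++ e.2 ++ "\n")
      ("***Conciseness Feedback***\n\n" ++ "These summary sentences do not contain key content: \n")

def create_feedback_report (sentences : List String) (faithfulness_labels : List Int) (keyfacts : List String) (completeness_labels : List Int) (conciseness_labels : List Int) : String :=
  let faithfulness_feedback := pvCollect sentences faithfulness_labels
  let completeness_feedback := pvCollect keyfacts completeness_labels
  let conciseness_feedback := pvCollect sentences conciseness_labels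
  PySem.Str.join "\n\n"
    [pvFaithReport faithfulness_feedback, pvCompReport completeness_feedback,
     pvConcReport conciseness_feedback]

-- ===== PORT B =====
-- B's single-pass section builder: buffer of formatted lines + found-flag
def pvSection (header all_msg intro prefix_ : String) (items : List String) (labels : List Int) : String :=
  let r := (PySem.List.enumerate (items.zip labels)).foldl
    (fun (acc : String × Bool) p =>
      if p.2.2 == 0 then
        (acc.1 ++ (prefix_ ++ PySem.Int.toStr (p.1 + 1) ++ ": " ++ p.2.1 ++ "\n"), true)
      else acc)
    ("", false)
  header ++ "\n\n" ++ (if r.2 then intro ++ r.1 else all_msg)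

def create_feedback_report_alt (sentences : List String) (faithfulness_labels : List Int) (keyfacts : List String) (completeness_labels : List Int) (conciseness_labels : List Int) : String :=
  PySem.Str.join "\n\n"
    [pvSection "***Faithfulness Feedback***"
        "All sentences are factually consistent with the Document.\n"
        "These summary sentences are factually inconsistent with the Document: \n"
        "- Sentence " sentences faithfulness_labels,
     pvSection "***Completeness Feedback***"
        "All key contents are included in the summary.\n"
        "These key contents are missing in the summary: \n"
        "Missing key content " keyfacts completeness_labels,
     pvSection "***Conciseness Feedback***"
        "All summary sentences contain key content.\n"
        "These summary sentences do not contain key content: \n"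
        "Sentence " sentences conciseness_labels]

-- ===== PRECONDITION & SPEC =====
def Spec_create_feedback_report (sentences : List String) (faithfulness_labels : List Int) (keyfacts : List String) (completeness_labels : List Int) (conciseness_labels : List Int) (out : String) : Prop := out = create_feedback_report_alt sentences faithfulness_labels keyfacts completeness_labels conciseness_labels
instance (sentences : List String) (faithfulness_labels : List Int) (keyfacts : List String) (completeness_labels : List Int) (conciseness_labels : List Int) (out : String) : Decidable (Spec_create_feedback_report sentences faithfulness_labels keyfacts completeness_labels conciseness_labels out) := by unfold Spec_create_feedback_report; infer_instance

-- ===== CLAIM (what is proved, stated in full; the proofs are below) =====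
def Claim_equal_create_feedback_report : Prop := ∀ (sentences : List String) (faithfulness_labels : List Int) (keyfacts : List String) (completeness_labels : List Int) (conciseness_labels : List Int), Dom_create_feedback_report sentences faithfulness_labels keyfacts completeness_labels conciseness_labels → Spec_create_feedback_report sentences faithfulness_labels keyfacts completeness_labels conciseness_labels (create_feedback_report sentences faithfulness_labels keyfacts completeness_labels conciseness_labels)

-- ===== LEMMAS AND PROOFS =====

-- concatenation of a list of strings (proof-side normal form of both folds)
def pvCat : List String → String
  | [] => ""
  | x :: xs => x ++ pvCat xs

-- A's report loop 'report += line(e)' is init ++ concatenation of the lines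
theorem pvFoldStr (f : Int × String → String) :
    ∀ (data : List (Int × String)) (init : String),
      data.foldl (fun r e => r ++ f e) init = init ++ pvCat (data.map f) := by
  intro data
  induction data with
  | nil => intro init; simp [pvCat]
  | cons x xs ih =>
      intro init
      simp [pvCat, ih, String.append_assoc]

-- B's buffer/flag loop computes (concatenation of lines of label-0 entries, any label 0)
theorem pvBFold (line : Int × String × Int → String) :
    ∀ (L : List (Int × String × Int)) (s : String) (b : Bool),
      L.foldl
        (fun (acc : String × Bool) p =>
          if p.2.2 == 0 then (acc.1 ++ line p, true) else acc) (s, b)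
      = (s ++ pvCat ((L.filter (fun p => p.2.2 == 0)).map line),
         b || L.any (fun p => p.2.2 == 0)) := by
  intro L
  induction L with
  | nil => intro s b; simp [pvCat]
  | cons x xs ih =>
      intro s b
      by_cases h : x.2.2 = 0
      · have hx : (x.2.2 == 0) = true := by simp [h]
        simp only [List.foldl_cons, hx, if_true]
        rw [ih]
        simp [List.any_cons, hx, pvCat, String.append_assoc]
      · have hx : (x.2.2 == 0) = false := by simp [h]
        simp only [List.foldl_cons, hx, Bool.false_eq_true, if_false]
        rw [ih]
        simp [List.any_cons, hx]

-- the A-side fold body is the same function up to re-association of ++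
theorem pvFoldBody (prefix_ : String) (data : List (Int × String)) (init : String) :
    data.foldl (fun r e => r ++ prefix_ ++ PySem.Int.toStr e.1 ++ ": " ++ e.2 ++ "\n") init
      = data.foldl (fun r e => r ++ (prefix_ ++ PySem.Int.toStr e.1 ++ ": " ++ e.2 ++ "\n")) init := by
  apply PySem.List.foldl_congr_mem
  intro acc x _
  simp [String.append_assoc]

-- generic section equivalence: A's collect-then-report equals B's pvSection
theorem pvSection_eq (header all_msg intro prefix_ : String)
    (items : List String) (labels : List Int)
    (rep : List (Int × String) → String)
    (hrep : ∀ data : List (Int × String),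
      rep data =
        if data.length == 0 then (header ++ "\n\n") ++ all_msg
        else data.foldl
          (fun r e => r ++ prefix_ ++ PySem.Int.toStr e.1 ++ ": " ++ e.2 ++ "\n")
          ((header ++ "\n\n") ++ intro)) :
    rep (pvCollect items labels)
      = pvSection header all_msg intro prefix_ items labels := by
  rw [hrep]
  simp only [pvCollect, pvSection]
  set L := PySem.List.enumerate (items.zip labels) with hL
  have hcol := PySem.List.foldl_append_if (l := L) (acc := ([] : List (Int × String)))
    (p := fun q : Int × String × Int => q.2.2 == 0)
    (f := fun q : Int × String × Int => (q.1 + 1, q.2.1))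
  rw [hcol]
  rw [pvBFold (line := fun p => prefix_ ++ PySem.Int.toStr (p.1 + 1) ++ ": " ++ p.2.1 ++ "\n")]
  simp only [List.nil_append, Bool.false_or, String.empty_append]
  by_cases h : L.any (fun p => p.2.2 == 0)
  · have hne : (L.filter (fun p => p.2.2 == 0)) ≠ [] := by
      intro hnil
      rw [List.any_eq_true] at h
      obtain ⟨x, hx, hpx⟩ := h
      have : x ∈ L.filter (fun p => p.2.2 == 0) := List.mem_filter.mpr ⟨hx, hpx⟩
      simp [hnil] at this
    have hlen : (((L.filter (fun p => p.2.2 == 0)).map (fun p => (p.1 + 1, p.2.1))).length == 0) = false := by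
      simp [List.length_eq_zero_iff, hne]
    rw [hlen, h]
    simp only [Bool.false_eq_true, if_false, if_true]
    rw [pvFoldBody]
    rw [pvFoldStr (f := fun e => prefix_ ++ PySem.Int.toStr e.1 ++ ": " ++ e.2 ++ "\n")]
    · rw [List.map_map]
      simp [String.append_assoc, Function.comp_def]
  · simp only [Bool.not_eq_true] at h
    have hfil : L.filter (fun p => p.2.2 == 0) = [] := by
      rw [List.filter_eq_nil_iff]
      intro x hx
      rw [List.any_eq_false] at h
      exact h x hx
    rw [hfil, h]
    simp [pvCat, String.append_assoc]

-- ===== VERDICT (by name: the statement is the Claim_ definition above) =====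
theorem create_feedback_report_spec : Claim_equal_create_feedback_report := by
  intro sentences faithfulness_labels keyfacts completeness_labels conciseness_labels _
  unfold Spec_create_feedback_report create_feedback_report create_feedback_report_alt
  have h1 := pvSection_eq "***Faithfulness Feedback***"
      "All sentences are factually consistent with the Document.\n"
      "These summary sentences are factually inconsistent with the Document: \n"
      "- Sentence " sentences faithfulness_labels pvFaithReport
      (fun _ => rfl)
  have h2 := pvSection_eq "***Completeness Feedback***"
      "All key contents are included in the summary.\n"
      "These key contents are missing in the summary: \n"
      "Missing key content " keyfacts completeness_labels pvCompReport
      (fun _ => rfl)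
  have h3 := pvSection_eq "***Conciseness Feedback***"
      "All summary sentences contain key content.\n"
      "These summary sentences do not contain key content: \n"
      "Sentence " sentences conciseness_labels pvConcReport
      (fun _ => rfl)
  simp only [h1, h2, h3]
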